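-- pv_equiv track=rewrite | github.com/mrferreira-net/Little_Dude | pacman/pacman_1.py | _compute_layout
-- ===== SOURCE A (Python) =====
-- MAP_COLS = 28
--
-- MAP_ROWS = 29
--
-- def _compute_layout(screen_w, screen_h):
--     for tile in range(80,4,-1):
--         map_w=MAP_COLS*tile
--         map_h=MAP_ROWS*tile
--         hud_h=tile
--         if map_w>screen_w or map_h + hud_h>screen_h:
--             continue
--         if not any(tile % s == 0 for s in [2,3,4,6,8,12]):
--             continue
--         win_w = screen_w
--         win_h = map_h + hud_h
--         off_x = (screen_w-map_w)//2
--         off_y = hud_h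
--         return tile, win_w, win_h, off_x, off_y
--     return 8, screen_w, MAP_ROWS*8+8, (screen_w-MAP_COLS*8)//2,8
-- ===== SOURCE B (Python) =====
-- MAP_COLS = 28
--
-- MAP_ROWS = 29
--
-- def _compute_layout(screen_w, screen_h):
--     # closed form: largest feasible tile is tmax = min(80, screen_w//28, screen_h//30);
--     # the largest tile in [5, tmax] divisible by 2 or 3 is tmax itself or tmax-1 (which is even)
--     tmax = min(80, screen_w // MAP_COLS, screen_h // (MAP_ROWS + 1))
--     if tmax >= 5:
--         tile = tmax if (tmax % 2 == 0 or tmax % 3 == 0) else tmax - 1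
--         if tile >= 5:
--             return tile, screen_w, (MAP_ROWS + 1) * tile, (screen_w - MAP_COLS * tile) // 2, tile
--     return 8, screen_w, MAP_ROWS * 8 + 8, (screen_w - MAP_COLS * 8) // 2, 8
-- ===== Notes on version B (the rewrite author's own statement) =====
-- stated objective: simpler
-- what changed: Replaced the 80..5 descending scan with a closed form: tmax = min(80, screen_w//28, screen_h//30) is the largest feasible tile, and the largest tile in [5,tmax] divisible by one of [2,3,4,6,8,12] (equivalently by 2 or 3) is tmax or tmax-1, so no loop is needed.
import Mathlib
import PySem

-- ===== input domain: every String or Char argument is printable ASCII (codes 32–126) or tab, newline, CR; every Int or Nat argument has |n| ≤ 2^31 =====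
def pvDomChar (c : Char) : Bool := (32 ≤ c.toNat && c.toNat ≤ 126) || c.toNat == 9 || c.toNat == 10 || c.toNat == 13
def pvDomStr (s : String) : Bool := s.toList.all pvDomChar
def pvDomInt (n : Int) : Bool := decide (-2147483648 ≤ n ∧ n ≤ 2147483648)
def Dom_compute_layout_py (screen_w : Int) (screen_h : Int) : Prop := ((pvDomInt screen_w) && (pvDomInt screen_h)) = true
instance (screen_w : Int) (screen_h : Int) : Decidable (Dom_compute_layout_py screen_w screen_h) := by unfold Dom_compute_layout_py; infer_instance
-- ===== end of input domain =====

-- B replaces A's descending 80..5 scan by a closed form for the largest feasible tile (objective: simpler).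

-- ===== PORT A =====
-- the for-loop over range(80,4,-1) with early return, as structural recursion over the range list
def pvLoopA (screen_w screen_h : Int) : List Int → Int × Int × Int × Int × Int
  | [] => (8, screen_w, 29 * 8 + 8, PySem.Int.floordiv (screen_w - 28 * 8) 2, 8)
  | tile :: ts =>
    let map_w := 28 * tile
    let map_h := 29 * tile
    let hud_h := tile
    if map_w > screen_w ∨ map_h + hud_h > screen_h then pvLoopA screen_w screen_h ts
    else if ¬ (([2, 3, 4, 6, 8, 12] : List Int).any fun s => PySem.Int.mod tile s == 0) then
      pvLoopA screen_w screen_h ts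
    else (tile, screen_w, map_h + hud_h, PySem.Int.floordiv (screen_w - map_w) 2, hud_h)

def compute_layout_py (screen_w : Int) (screen_h : Int) : Int × Int × Int × Int × Int :=
  pvLoopA screen_w screen_h (PySem.List.pyRange 80 4 (-1))

-- ===== PORT B =====
def compute_layout_py_alt (screen_w : Int) (screen_h : Int) : Int × Int × Int × Int × Int :=
  let tmax := min (min 80 (PySem.Int.floordiv screen_w 28)) (PySem.Int.floordiv screen_h 30)
  if 5 ≤ tmax then
    let tile := if PySem.Int.mod tmax 2 = 0 ∨ PySem.Int.mod tmax 3 = 0 then tmax else tmax - 1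
    if 5 ≤ tile then
      (tile, screen_w, 30 * tile, PySem.Int.floordiv (screen_w - 28 * tile) 2, tile)
    else (8, screen_w, 29 * 8 + 8, PySem.Int.floordiv (screen_w - 28 * 8) 2, 8)
  else (8, screen_w, 29 * 8 + 8, PySem.Int.floordiv (screen_w - 28 * 8) 2, 8)

-- ===== PRECONDITION & SPEC =====
def Spec_compute_layout_py (screen_w : Int) (screen_h : Int) (out : Int × Int × Int × Int × Int) : Prop := out = compute_layout_py_alt screen_w screen_h
instance (screen_w : Int) (screen_h : Int) (out : Int × Int × Int × Int × Int) : Decidable (Spec_compute_layout_py screen_w screen_h out) := by unfold Spec_compute_layout_py; infer_instance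

-- ===== CLAIM (what is proved, stated in full; the proofs are below) =====
def Claim_equal_compute_layout_py : Prop := ∀ (screen_w : Int) (screen_h : Int), Dom_compute_layout_py screen_w screen_h → Spec_compute_layout_py screen_w screen_h (compute_layout_py screen_w screen_h)

-- ===== LEMMAS AND PROOFS =====

-- abbreviation used only by the proofs: the bound B computes
def pvM (screen_w screen_h : Int) : Int :=
  min (min 80 (PySem.Int.floordiv screen_w 28)) (PySem.Int.floordiv screen_h 30)

-- first tile accepted by A's loop, abstracted to depend only on the bound m
def pvPick (m : Int) : List Int → Option Int
  | [] => none
  | tile :: ts =>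
    if m < tile then pvPick m ts
    else if ¬ (([2, 3, 4, 6, 8, 12] : List Int).any fun s => PySem.Int.mod tile s == 0) then
      pvPick m ts
    else some tile

lemma pvGuard_iff (w h t : Int) (ht : 0 < t) (h80 : t ≤ 80) :
    (28 * t > w ∨ 29 * t + t > h) ↔ pvM w h < t := by
  have h1 : t ≤ PySem.Int.floordiv w 28 ↔ t * 28 ≤ w :=
    PySem.Int.le_floordiv_iff_mul_le (by omega)
  have h2 : t ≤ PySem.Int.floordiv h 30 ↔ t * 30 ≤ h :=
    PySem.Int.le_floordiv_iff_mul_le (by omega)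
  unfold pvM
  omega

lemma pvLoopA_eq_pick (w h : Int) (ts : List Int) (hmem : ∀ t ∈ ts, 5 ≤ t ∧ t ≤ 80) :
    pvLoopA w h ts =
      match pvPick (pvM w h) ts with
      | some t => (t, w, 29 * t + t, PySem.Int.floordiv (w - 28 * t) 2, t)
      | none => (8, w, 29 * 8 + 8, PySem.Int.floordiv (w - 28 * 8) 2, 8) := by
  induction ts with
  | nil => rfl
  | cons t ts ih =>
    have hb := hmem t (List.mem_cons_self ..)
    have hrest : ∀ x ∈ ts, 5 ≤ x ∧ x ≤ 80 := fun x hx => hmem x (List.mem_cons_of_mem _ hx)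
    have hg : (28 * t > w ∨ 29 * t + t > h) ↔ pvM w h < t :=
      pvGuard_iff w h t (by omega) (by omega)
    simp only [pvLoopA, pvPick, hg]
    by_cases hc : pvM w h < t
    · simp only [if_pos hc, ih hrest]
    · simp only [if_neg hc]
      by_cases hd : (([2, 3, 4, 6, 8, 12] : List Int).any fun s => PySem.Int.mod t s == 0)
      · simp [hd]
      · simp [hd, ih hrest]

lemma pvMem_range : ∀ t ∈ PySem.List.pyRange 80 4 (-1), 5 ≤ t ∧ t ≤ 80 := by decide

lemma pvPick_none (m : Int) (hm : m < 5) (ts : List Int) (hmem : ∀ t ∈ ts, 5 ≤ t ∧ t ≤ 80) :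
    pvPick m ts = none := by
  induction ts with
  | nil => rfl
  | cons t ts ih =>
    have hb := hmem t (List.mem_cons_self ..)
    have hrest : ∀ x ∈ ts, 5 ≤ x ∧ x ≤ 80 := fun x hx => hmem x (List.mem_cons_of_mem _ hx)
    simp only [pvPick, if_pos (show m < t by omega), ih hrest]

lemma pvPick_closed (m : Int) (h5 : 5 ≤ m) (h80 : m ≤ 80) :
    pvPick m (PySem.List.pyRange 80 4 (-1)) =
      (if 5 ≤ (if PySem.Int.mod m 2 = 0 ∨ PySem.Int.mod m 3 = 0 then m else m - 1)
       then some (if PySem.Int.mod m 2 = 0 ∨ PySem.Int.mod m 3 = 0 then m else m - 1)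
       else none) := by
  interval_cases m <;> decide

-- ===== VERDICT (by name: the statement is the Claim_ definition above) =====
theorem compute_layout_py_spec : Claim_equal_compute_layout_py := by
  intro w h _
  unfold Spec_compute_layout_py compute_layout_py compute_layout_py_alt
  rw [pvLoopA_eq_pick w h _ pvMem_range,
    show min (min 80 (PySem.Int.floordiv w 28)) (PySem.Int.floordiv h 30) = pvM w h from rfl]
  have h80 : pvM w h ≤ 80 := by unfold pvM; omega
  by_cases h5 : 5 ≤ pvM w h
  · rw [pvPick_closed (pvM w h) h5 h80, if_pos h5]
    by_cases hd : PySem.Int.mod (pvM w h) 2 = 0 ∨ PySem.Int.mod (pvM w h) 3 = 0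
    · simp only [if_pos hd, if_pos (show (5:Int) ≤ pvM w h from h5)]
      simp [Prod.ext_iff]
      ring
    · simp only [if_neg hd]
      by_cases h6 : 5 ≤ pvM w h - 1
      · simp only [if_pos h6]
        simp [Prod.ext_iff]
        ring
      · simp only [if_neg h6]
  · rw [pvPick_none (pvM w h) (by omega) _ pvMem_range, if_neg h5]
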